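-- pv_equiv track=rewrite | github.com/maslinych/daba | morphology.py | print_gloss
-- ===== SOURCE A (Python) =====
-- def print_gloss(gloss):
--     'gloss -> str'
--     stem, (preflist, sufflist), pslist, ge = gloss
--     if preflist:
--         prefmorph, prefgloss = zip(*preflist)
--     else:
--         prefmorph, prefgloss = [], []
--     if sufflist:
--         suffmorph, suffgloss = zip(*sufflist)
--     else:
--         suffmorph, suffgloss = [], []
--     form = '-'.join([i for j in [prefmorph, [stem], suffmorph] for i in j])
--     glossstring = '-'.join([i for j in [prefgloss, [stem], suffgloss] for i in j])
--     psstring = '/'.join(pslist)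
--     return u'{0} {1} {2} ‘{3}’'.format(form, glossstring, psstring, ge)
-- ===== SOURCE B (Python) =====
-- def print_gloss(gloss):
--     'gloss -> str'
--     stem, (preflist, sufflist), pslist, ge = gloss
--     form = ''
--     glossstring = ''
--     for m, g in preflist:
--         form += m + '-'
--         glossstring += g + '-'
--     form += stem
--     glossstring += stem
--     for m, g in sufflist:
--         form += '-' + m
--         glossstring += '-' + g
--     if pslist:
--         psstring = pslist[0]
--         for p in pslist[1:]:
--             psstring += '/' + p
--     else:
--         psstring = ''
--     return u'{0} {1} {2} \u2018{3}\u2019'.format(form, glossstring, psstring, ge)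
-- ===== Notes on version B (the rewrite author's own statement) =====
-- stated objective: alternative
-- what changed: B replaces A's column-splitting (zip(*...) with empty-list guards) and three join() calls with imperative single-pass string accumulation: one loop over prefixes and one over suffixes grow form and glossstring in place with explicit separator placement, and psstring is built by a seeded fold over pslist instead of '/'.join.
import Mathlib
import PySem

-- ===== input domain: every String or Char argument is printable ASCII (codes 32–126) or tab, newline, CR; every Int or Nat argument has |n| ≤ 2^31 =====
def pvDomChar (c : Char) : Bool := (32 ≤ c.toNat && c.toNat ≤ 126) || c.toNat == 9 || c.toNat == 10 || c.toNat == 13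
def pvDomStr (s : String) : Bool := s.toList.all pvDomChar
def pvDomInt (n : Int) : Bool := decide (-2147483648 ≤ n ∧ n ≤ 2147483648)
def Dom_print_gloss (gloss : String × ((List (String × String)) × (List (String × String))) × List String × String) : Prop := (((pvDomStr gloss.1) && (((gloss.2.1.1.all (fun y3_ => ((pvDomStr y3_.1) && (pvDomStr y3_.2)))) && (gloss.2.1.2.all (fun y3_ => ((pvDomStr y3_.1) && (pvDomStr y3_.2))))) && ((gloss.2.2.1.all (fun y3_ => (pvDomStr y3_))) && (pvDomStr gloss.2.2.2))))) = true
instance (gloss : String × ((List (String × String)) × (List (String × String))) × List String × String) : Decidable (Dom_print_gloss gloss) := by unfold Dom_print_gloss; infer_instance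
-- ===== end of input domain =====

-- B builds form/glossstring by in-place single-pass string accumulation with explicit
-- separators instead of A's zip(*...) column-splitting and join() calls (objective: alternative).

-- ===== PORT A =====
def print_gloss (gloss : String × ((List (String × String)) × (List (String × String))) × List String × String) : String :=
  let stem := gloss.1
  let preflist := gloss.2.1.1
  let sufflist := gloss.2.1.2
  let pslist := gloss.2.2.1
  let ge := gloss.2.2.2
  -- if preflist: prefmorph, prefgloss = zip(*preflist) else ([], [])
  let pref := if preflist.isEmpty then ([], []) else preflist.unzip
  let suff := if sufflist.isEmpty then ([], []) else sufflist.unzip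
  let form := PySem.Str.join "-" (pref.1 ++ [stem] ++ suff.1)
  let glossstring := PySem.Str.join "-" (pref.2 ++ [stem] ++ suff.2)
  let psstring := PySem.Str.join "/" pslist
  form ++ " " ++ glossstring ++ " " ++ psstring ++ " ‘" ++ ge ++ "’"

-- ===== PORT B =====
def print_gloss_alt (gloss : String × ((List (String × String)) × (List (String × String))) × List String × String) : String :=
  let stem := gloss.1
  let preflist := gloss.2.1.1
  let sufflist := gloss.2.1.2
  let pslist := gloss.2.2.1
  let ge := gloss.2.2.2
  -- for m, g in preflist: form += m + '-'; glossstring += g + '-'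
  let acc0 := preflist.foldl (fun (a : String × String) p => (a.1 ++ p.1 ++ "-", a.2 ++ p.2 ++ "-")) ("", "")
  -- form += stem; glossstring += stem
  let acc1 : String × String := (acc0.1 ++ stem, acc0.2 ++ stem)
  -- for m, g in sufflist: form += '-' + m; glossstring += '-' + g
  let acc2 := sufflist.foldl (fun (a : String × String) p => (a.1 ++ "-" ++ p.1, a.2 ++ "-" ++ p.2)) acc1
  -- psstring seeded fold
  let psstring := match pslist with
    | [] => ""
    | p :: rest => rest.foldl (fun a s => a ++ "/" ++ s) p
  acc2.1 ++ " " ++ acc2.2 ++ " " ++ psstring ++ " ‘" ++ ge ++ "’"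

-- ===== PRECONDITION & SPEC =====
def Spec_print_gloss (gloss : String × ((List (String × String)) × (List (String × String))) × List String × String) (out : String) : Prop := out = print_gloss_alt gloss
instance (gloss : String × ((List (String × String)) × (List (String × String))) × List String × String) (out : String) : Decidable (Spec_print_gloss gloss out) := by unfold Spec_print_gloss; infer_instance

-- ===== CLAIM =====
def Claim_equal_print_gloss : Prop := ∀ (gloss : String × ((List (String × String)) × (List (String × String))) × List String × String), Dom_print_gloss gloss → Spec_print_gloss gloss (print_gloss gloss)

-- ===== LEMMAS AND PROOFS =====
theorem pv_join_cons_cons (sep a b : String) (ys : List String) :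
    PySem.Str.join sep (a :: b :: ys) = a ++ sep ++ PySem.Str.join sep (b :: ys) := by
  simp [PySem.Str.join, PySem.Chars.join, List.intercalate, String.append_assoc]

theorem pv_foldl_pull_left (sep x s : String) (ys : List String) :
    ys.foldl (fun a m => a ++ sep ++ m) (x ++ s) = x ++ ys.foldl (fun a m => a ++ sep ++ m) s := by
  induction ys generalizing s with
  | nil => rfl
  | cons b ys ih =>
      rw [List.foldl_cons, List.foldl_cons]
      have e : (x ++ s) ++ sep ++ b = x ++ (s ++ sep ++ b) := by simp [String.append_assoc]
      rw [e]; exact ih (s ++ sep ++ b)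

theorem pv_foldl_pull_right (sep x s : String) (ys : List String) :
    ys.foldl (fun a m => a ++ m ++ sep) (x ++ s) = x ++ ys.foldl (fun a m => a ++ m ++ sep) s := by
  induction ys generalizing s with
  | nil => rfl
  | cons b ys ih =>
      rw [List.foldl_cons, List.foldl_cons]
      have e : (x ++ s) ++ b ++ sep = x ++ (s ++ b ++ sep) := by simp [String.append_assoc]
      rw [e]; exact ih (s ++ b ++ sep)

theorem pv_join_cons (sep a : String) (ys : List String) :
    PySem.Str.join sep (a :: ys) = ys.foldl (fun acc m => acc ++ sep ++ m) a := by
  induction ys generalizing a with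
  | nil => simp [PySem.Str.join, PySem.Chars.join, List.intercalate]
  | cons b ys ih =>
      rw [pv_join_cons_cons, ih b, List.foldl_cons, ← pv_foldl_pull_left sep (a ++ sep) b ys]

theorem pv_join_pre (sep a : String) (xs rest : List String) :
    PySem.Str.join sep (xs ++ a :: rest) =
      xs.foldl (fun acc m => acc ++ m ++ sep) "" ++ PySem.Str.join sep (a :: rest) := by
  induction xs with
  | nil => simp
  | cons x xs ih =>
      have h1 : PySem.Str.join sep (x :: (xs ++ a :: rest))
          = x ++ sep ++ PySem.Str.join sep (xs ++ a :: rest) := by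
        cases xs with
        | nil => exact pv_join_cons_cons sep x a rest
        | cons y ys => exact pv_join_cons_cons sep x y (ys ++ a :: rest)
      rw [List.cons_append, h1, ih, List.foldl_cons]
      have e : ("" : String) ++ x ++ sep = (x ++ sep) ++ "" := by simp
      rw [e, pv_foldl_pull_right sep (x ++ sep) "" xs]
      simp [String.append_assoc]

theorem pv_foldl_pair_pre (l : List (String × String)) (x y : String) :
    l.foldl (fun (a : String × String) p => (a.1 ++ p.1 ++ "-", a.2 ++ p.2 ++ "-")) (x, y)
      = (l.foldl (fun a p => a ++ p.1 ++ "-") x, l.foldl (fun a p => a ++ p.2 ++ "-") y) := by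
  induction l generalizing x y with
  | nil => rfl
  | cons p l ih => simp only [List.foldl_cons]; exact ih _ _

theorem pv_foldl_pair_suf (l : List (String × String)) (x y : String) :
    l.foldl (fun (a : String × String) p => (a.1 ++ "-" ++ p.1, a.2 ++ "-" ++ p.2)) (x, y)
      = (l.foldl (fun a p => a ++ "-" ++ p.1) x, l.foldl (fun a p => a ++ "-" ++ p.2) y) := by
  induction l generalizing x y with
  | nil => rfl
  | cons p l ih => simp only [List.foldl_cons]; exact ih _ _

-- A's guarded unzip equals the two column projections.
theorem pv_guard_unzip (l : List (String × String)) :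
    (if l.isEmpty then (([] : List String), ([] : List String)) else l.unzip)
      = (l.map Prod.fst, l.map Prod.snd) := by
  cases l with
  | nil => simp
  | cons p l => simp [List.unzip_fst, List.unzip_snd]

-- One column of A (join over pre ++ [stem] ++ suf) equals one column of B (two folds).
theorem pv_column (stem : String) (pre suf : List String) :
    PySem.Str.join "-" (pre ++ [stem] ++ suf)
      = suf.foldl (fun a m => a ++ "-" ++ m) (pre.foldl (fun a m => a ++ m ++ "-") "" ++ stem) := by
  rw [List.append_assoc, List.singleton_append, pv_join_pre, pv_join_cons,
    pv_foldl_pull_left]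

theorem pv_ps (pslist : List String) :
    PySem.Str.join "/" pslist
      = match pslist with
        | [] => ""
        | p :: rest => rest.foldl (fun a s => a ++ "/" ++ s) p := by
  cases pslist with
  | nil => decide
  | cons p rest => exact pv_join_cons "/" p rest

-- ===== VERDICT =====
theorem print_gloss_spec : Claim_equal_print_gloss := by
  intro gloss _
  obtain ⟨stem, ⟨preflist, sufflist⟩, pslist, ge⟩ := gloss
  unfold Spec_print_gloss print_gloss print_gloss_alt
  simp only [pv_guard_unzip, pv_foldl_pair_pre, pv_foldl_pair_suf, pv_ps, pv_column,
    ← List.foldl_map (f := Prod.fst) (g := fun (a m : String) => a ++ m ++ "-"),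
    ← List.foldl_map (f := Prod.snd) (g := fun (a m : String) => a ++ m ++ "-"),
    ← List.foldl_map (f := Prod.fst) (g := fun (a m : String) => a ++ "-" ++ m),
    ← List.foldl_map (f := Prod.snd) (g := fun (a m : String) => a ++ "-" ++ m)]
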